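-- pv_equiv track=rewrite | github.com/zxcqwe4906/sudoku_game | utils/solve.py | board_str_to_board
-- ===== SOURCE A (Python) =====
-- def board_str_to_board(board_str):
--     """
--     input: ..8..9.1..7...1..4.
--     output: [["", "8", "", "9"], []]
--     """
--     return_list = []
--     temp_list = []
--     for i, _ in enumerate(board_str):
--         if i + 1 >= len(board_str):
--             if board_str[i] == '.':
--                 temp_list.append("")
--                 return_list.append(temp_list)
--             break
--         if board_str[i] != '.':
--             continue
--         if board_str[i+1] == '.':
--             temp_list.append("")
--         else:
--             temp_list.append(str(board_str[i+1]))
--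
--         if len(temp_list) >= 9:
--             return_list.append(temp_list)
--             temp_list = []
--
--     return return_list
-- ===== SOURCE B (Python) =====
-- def board_str_to_board(board_str):
--     if not board_str:
--         return []
--     cells = ['' if b == '.' else b for a, b in zip(board_str, board_str[1:]) if a == '.']
--     rows = []
--     while len(cells) >= 9:
--         rows.append(cells[:9])
--         cells = cells[9:]
--     if board_str[-1] == '.':
--         rows.append(cells + [''])
--     return rows
-- ===== Notes on version B (the rewrite author's own statement) =====
-- stated objective: simpler
-- what changed: Replaced A's single stateful loop (index lookahead, temp buffer, flush-at-9, end special-case) by two plain phases: a pairwise zip comprehension collecting the flat cell list, then a chunk-into-9s loop with the trailing row appended only when the board ends in '.'.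
import Mathlib
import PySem

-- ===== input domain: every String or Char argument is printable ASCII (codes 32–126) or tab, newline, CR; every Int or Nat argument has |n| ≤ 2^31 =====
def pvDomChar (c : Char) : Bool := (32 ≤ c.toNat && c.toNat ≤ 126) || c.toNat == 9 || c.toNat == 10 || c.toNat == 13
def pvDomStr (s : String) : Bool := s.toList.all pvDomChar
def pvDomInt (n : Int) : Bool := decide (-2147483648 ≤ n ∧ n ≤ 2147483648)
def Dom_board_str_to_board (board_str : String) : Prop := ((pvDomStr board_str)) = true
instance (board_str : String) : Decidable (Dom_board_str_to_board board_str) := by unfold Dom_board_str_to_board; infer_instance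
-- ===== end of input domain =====

-- B re-decomposes A's single stateful buffering loop into: one pairwise-zip pass collecting
-- the flat cell list, then a separate chunk-into-rows loop (objective: simpler decomposition).

-- ===== PORT A =====
-- A's for-loop over i with the i+1 lookahead, the temp buffer and the flush-at-9, as a
-- structural recursion over the character list (the [c] case is A's i+1 >= len branch).
def pvALoop : List Char → List (List String) → List String → List (List String)
  | [], ret, _ => ret
  | [c], ret, temp => if c = '.' then ret ++ [temp ++ [""]] else ret
  | c :: c2 :: rest, ret, temp =>
    if c ≠ '.' then pvALoop (c2 :: rest) ret temp
    else
      let temp' := temp ++ [if c2 = '.' then "" else String.ofList [c2]]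
      if temp'.length ≥ 9 then pvALoop (c2 :: rest) (ret ++ [temp']) []
      else pvALoop (c2 :: rest) ret temp'

def board_str_to_board (board_str : String) : List (List String) :=
  pvALoop board_str.toList [] []

-- ===== PORT B =====
-- the while-loop: peel full rows of 9 off the front, return (rows, leftover cells)
def pvBChunk (cells : List String) : List (List String) × List String :=
  if cells.length ≥ 9 then
    let r := pvBChunk (cells.drop 9)   -- cells[:9] / cells[9:] (nonnegative slices = take/drop)
    (cells.take 9 :: r.1, r.2)
  else ([], cells)
termination_by cells.length
decreasing_by simp [List.length_drop]; omega

def board_str_to_board_alt (board_str : String) : List (List String) :=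
  let s := board_str.toList
  if s = [] then []
  else
    let cells := ((s.zip s.tail).filter (fun p => p.1 = '.')).map
      (fun p => if p.2 = '.' then "" else String.ofList [p.2])
    let r := pvBChunk cells
    if s.getLast? = some '.' then r.1 ++ [r.2 ++ [""]] else r.1

-- ===== PRECONDITION & SPEC =====
def Spec_board_str_to_board (board_str : String) (out : List (List String)) : Prop := out = board_str_to_board_alt board_str
instance (board_str : String) (out : List (List String)) : Decidable (Spec_board_str_to_board board_str out) := by unfold Spec_board_str_to_board; infer_instance

-- ===== CLAIM (what is proved, stated in full; the proofs are below) =====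
def Claim_equal_board_str_to_board : Prop := ∀ (board_str : String), Dom_board_str_to_board board_str → Spec_board_str_to_board board_str (board_str_to_board board_str)

-- ===== LEMMAS AND PROOFS =====

-- the flat cell stream of a (suffix of the) board, as B computes it
def pvCells (s : List Char) : List String :=
  ((s.zip s.tail).filter (fun p => p.1 = '.')).map
    (fun p => if p.2 = '.' then "" else String.ofList [p.2])

-- B's tail phase applied to a cell stream
def pvFinish (l : List String) (b : Bool) : List (List String) :=
  let r := pvBChunk l
  if b then r.1 ++ [r.2 ++ [""]] else r.1

lemma pvBChunk_short {l : List String} (h : l.length < 9) : pvBChunk l = ([], l) := by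
  rw [pvBChunk]; simp [Nat.not_le.mpr h]

lemma pvBChunk_cons_of_nine {l m : List String} (h : l.length = 9) :
    pvBChunk (l ++ m) = (l :: (pvBChunk m).1, (pvBChunk m).2) := by
  rw [pvBChunk]
  have hlen : (l ++ m).length ≥ 9 := by simp [h]
  simp only [hlen, if_pos]
  simp [h]

lemma pvFinish_cons_of_nine {l m : List String} (h : l.length = 9) (b : Bool) :
    pvFinish (l ++ m) b = l :: pvFinish m b := by
  cases b <;> simp [pvFinish, pvBChunk_cons_of_nine h]

lemma pvCells_cons (c c2 : Char) (rest : List Char) :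
    pvCells (c :: c2 :: rest)
      = (if c = '.' then [if c2 = '.' then "" else String.ofList [c2]] else []) ++ pvCells (c2 :: rest) := by
  by_cases h : c = '.' <;> simp [pvCells, h]

lemma pvALoop_eq (s : List Char) : ∀ (ret : List (List String)) (temp : List String),
    temp.length < 9 → s ≠ [] →
    pvALoop s ret temp = ret ++ pvFinish (temp ++ pvCells s) (decide (s.getLast? = some '.')) := by
  induction s with
  | nil => intro _ _ _ h; exact absurd rfl h
  | cons c t ih =>
    intro ret temp htemp _
    cases t with
    | nil =>
      by_cases h : c = '.' <;>
        simp [pvALoop, pvCells, pvFinish, h, pvBChunk_short htemp]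
    | cons c2 rest =>
      have hlast : (c :: c2 :: rest).getLast? = (c2 :: rest).getLast? := by
        simp [List.getLast?_cons_cons]
      rw [hlast, pvCells_cons]
      by_cases h : c = '.'
      · simp only [pvALoop, h, if_pos, ne_eq, not_true_eq_false, if_false]
        set v := (if c2 = '.' then "" else String.ofList [c2]) with hv
        by_cases h9 : (temp ++ [v]).length ≥ 9
        · have h9' : (temp ++ [v]).length = 9 := by simp at h9 ⊢; omega
          rw [if_pos h9, ih (ret ++ [temp ++ [v]]) [] (by norm_num) (by simp)]
          rw [show temp ++ ([v] ++ pvCells (c2 :: rest)) = (temp ++ [v]) ++ pvCells (c2 :: rest) from (List.append_assoc _ _ _).symm,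
              pvFinish_cons_of_nine h9']
          simp
        · rw [if_neg h9, ih ret (temp ++ [v]) (by simp at h9 ⊢; omega) (by simp)]
          simp
      · simp only [pvALoop, h, ne_eq, not_false_eq_true, if_true, ite_false]
        rw [ih ret temp htemp (by simp)]
        simp

-- ===== VERDICT (by name: the statement is the Claim_ definition above) =====
theorem board_str_to_board_spec : Claim_equal_board_str_to_board := by
  intro board_str _
  unfold Spec_board_str_to_board board_str_to_board board_str_to_board_alt
  by_cases hs : board_str.toList = []
  · simp [hs, pvALoop]
  · rw [pvALoop_eq board_str.toList [] [] (by norm_num) hs]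
    simp only [hs, List.nil_append, pvFinish, pvCells]
    by_cases hl : board_str.toList.getLast? = some '.' <;> simp [hl]
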